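-- pv_equiv track=rewrite | github.com/jacky-btc/oj | comb.py | gen_prob_mem
-- ===== SOURCE A (Python) =====
-- from itertools import combinations, product
--
-- def gen_prob_mem(prob):
--     mem = {"": 0}
--     for l in range(1, len(prob)+1):
--         combs = combinations(prob.keys(), l)
--         for comb in combs:
--             prev_str = ",".join(map(str, comb[:-1]))
--             s = mem[prev_str] + prob[comb[-1]]
--             if prev_str:
--                 prev_str = prev_str + ","
--             comb_str = prev_str + str(comb[-1])
--             mem[comb_str] = s
--     del mem[""]
--     return mem
-- ===== SOURCE B (Python) =====
-- from itertools import combinations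
--
-- def gen_prob_mem(prob):
--     keys = list(prob)
--     return {",".join(map(str, comb)): sum(prob[k] for k in comb)
--             for l in range(1, len(keys) + 1)
--             for comb in combinations(keys, l)}
-- ===== Notes on version B (the rewrite author's own statement) =====
-- stated objective: simpler
-- what changed: Drops the memoization dict, the prefix-string lookup and the empty-key insert/delete entirely: a single dict comprehension builds each subset key with join and recomputes its sum directly.
import Mathlib
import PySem

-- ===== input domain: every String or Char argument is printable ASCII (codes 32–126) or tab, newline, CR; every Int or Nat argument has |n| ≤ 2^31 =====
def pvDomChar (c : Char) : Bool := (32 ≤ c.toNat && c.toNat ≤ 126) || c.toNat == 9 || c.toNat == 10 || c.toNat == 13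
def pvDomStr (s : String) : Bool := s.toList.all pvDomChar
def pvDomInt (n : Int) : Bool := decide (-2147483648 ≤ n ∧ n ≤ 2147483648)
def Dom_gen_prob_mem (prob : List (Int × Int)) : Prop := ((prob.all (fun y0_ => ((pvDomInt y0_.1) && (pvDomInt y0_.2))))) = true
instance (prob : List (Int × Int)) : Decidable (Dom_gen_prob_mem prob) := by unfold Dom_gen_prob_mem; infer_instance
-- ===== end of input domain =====

-- B drops A's memoization dict, prefix lookup and empty-key insert/delete: one comprehension
-- computing each subset's key by join and its sum directly (objective: simpler; same cost).

-- ===== PORT A =====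
-- Python's prob[k] on the dict (k is always one of prob's keys, so the default is never used)
def pyLook (prob : List (Int × Int)) (k : Int) : Int :=
  ((PySem.Dict.mk prob).get? k).getD 0

def gen_prob_mem (prob : List (Int × Int)) : List (String × Int) :=
  let mem : PySem.Dict String Int := PySem.Dict.mk [("", 0)]
  let mem := (PySem.List.pyRange 1 (PySem.List.len prob + 1)).foldl (fun mem l =>
    (PySem.List.combinations (prob.map Prod.fst) l.toNat).foldl (fun mem comb =>
      let prev_str := PySem.Str.join "," ((PySem.List.slice comb none (some (-1))).map PySem.Int.toStr)
      -- mem[prev_str]: the prefix key is always present (proved below), so getD's default is never used;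
      -- comb[-1]: comb is nonempty (l ≥ 1), so pyGet?'s default is never used
      let s := (mem.get? prev_str).getD 0 + pyLook prob ((PySem.List.pyGet? comb (-1)).getD 0)
      let prev_str := if prev_str ≠ "" then prev_str ++ "," else prev_str
      let comb_str := prev_str ++ PySem.Int.toStr ((PySem.List.pyGet? comb (-1)).getD 0)
      mem.insert comb_str s) mem) mem
  (mem.erase "").items

-- ===== PORT B =====
def gen_prob_mem_alt (prob : List (Int × Int)) : List (String × Int) :=
  let keys := prob.map Prod.fst
  ((PySem.List.pyRange 1 (PySem.List.len keys + 1)).foldl (fun res l =>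
    (PySem.List.combinations keys l.toNat).foldl (fun res comb =>
      res.insert (PySem.Str.join "," (comb.map PySem.Int.toStr))
                 (comb.foldl (fun a k => a + pyLook prob k) 0)) res)
    PySem.Dict.empty).items

-- ===== PRECONDITION & SPEC =====
-- Pre_ excludes association lists with duplicate keys: the parameter is a Python dict, whose
-- keys are necessarily distinct, so a duplicate-key list does not represent any actual input.
def Pre_gen_prob_mem (prob : List (Int × Int)) : Prop := (prob.map Prod.fst).Nodup
instance (prob : List (Int × Int)) : Decidable (Pre_gen_prob_mem prob) := by unfold Pre_gen_prob_mem; infer_instance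
def pvWitness_gen_prob_mem : (List (Int × Int)) := [(1, 2), (3, 4)]
def Spec_gen_prob_mem (prob : List (Int × Int)) (out : List (String × Int)) : Prop := out = gen_prob_mem_alt prob
instance (prob : List (Int × Int)) (out : List (String × Int)) : Decidable (Spec_gen_prob_mem prob out) := by unfold Spec_gen_prob_mem; infer_instance

-- ===== CLAIM (what is proved, stated in full; the proofs are below) =====
def Claim_equal_gen_prob_mem : Prop := ∀ (prob : List (Int × Int)), Dom_gen_prob_mem prob → Pre_gen_prob_mem prob → Spec_gen_prob_mem prob (gen_prob_mem prob)

-- ===== LEMMAS AND PROOFS =====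

theorem tdc_eq (f n : Nat) (ds : List Char) : Nat.toDigitsCore 10 (f+1) n ds =
    if n / 10 = 0 then (n % 10).digitChar :: ds else Nat.toDigitsCore 10 f (n/10) ((n % 10).digitChar :: ds) := by
  conv_lhs => rw [Nat.toDigitsCore]

theorem tdc_append : ∀ (f n : Nat) (ds : List Char),
    Nat.toDigitsCore 10 f n ds = Nat.toDigitsCore 10 f n [] ++ ds := by
  intro f
  induction f with
  | zero => intro n ds; rfl
  | succ f ih =>
    intro n ds
    rw [tdc_eq, tdc_eq]
    split
    · rfl
    · rw [ih (n/10) [(n % 10).digitChar], ih (n/10) ((n % 10).digitChar :: ds)]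
      simp

theorem digitChar_toNat {k : Nat} (h : k < 10) : (Nat.digitChar k).toNat = 48 + k := by
  interval_cases k <;> decide

theorem mem_tdc : ∀ (f n : Nat) (ds : List Char) (c : Char), c ∈ Nat.toDigitsCore 10 f n ds →
    c ∈ ds ∨ (48 ≤ c.toNat ∧ c.toNat ≤ 57) := by
  intro f
  induction f with
  | zero => intro n ds c h; exact Or.inl h
  | succ f ih =>
    intro n ds c h
    have hd : (48 ≤ ((n % 10).digitChar).toNat ∧ ((n % 10).digitChar).toNat ≤ 57) := by
      rw [digitChar_toNat (Nat.mod_lt _ (by norm_num))]; omega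
    rw [tdc_eq] at h
    split at h
    · rcases List.mem_cons.mp h with h | h
      · exact Or.inr (h ▸ hd)
      · exact Or.inl h
    · rcases ih _ _ _ h with h | h
      · rcases List.mem_cons.mp h with h | h
        · exact Or.inr (h ▸ hd)
        · exact Or.inl h
      · exact Or.inr h

theorem toDigits_ne_nil (n : Nat) : Nat.toDigits 10 n ≠ [] := by
  unfold Nat.toDigits
  rw [tdc_eq]
  split
  · simp
  · rw [tdc_append]; simp

def dval (ds : List Char) : Nat := ds.foldl (fun a c => 10 * a + (c.toNat - 48)) 0

theorem dval_tdc : ∀ (f n : Nat), n < f → dval (Nat.toDigitsCore 10 f n []) = n := by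
  intro f
  induction f with
  | zero => omega
  | succ f ih =>
    intro n hn
    rw [tdc_eq]
    have h10 : n % 10 < 10 := Nat.mod_lt _ (by norm_num)
    split
    · rename_i h0
      have : n < 10 := by omega
      simp [dval, List.foldl, digitChar_toNat h10]
      omega
    · rename_i h0
      rw [tdc_append]
      have hlt : n / 10 < f := by omega
      simp only [dval, List.foldl_append, List.foldl]
      have := ih (n / 10) hlt
      simp only [dval] at this
      rw [this, digitChar_toNat h10]
      omega

theorem toDigits_inj {a b : Nat} (h : Nat.toDigits 10 a = Nat.toDigits 10 b) : a = b := by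
  have ha := dval_tdc (a+1) a (by omega)
  have hb := dval_tdc (b+1) b (by omega)
  unfold Nat.toDigits at h
  rw [h] at ha
  rw [hb] at ha
  omega

theorem mem_toDigits {n : Nat} {c : Char} (h : c ∈ Nat.toDigits 10 n) :
    48 ≤ c.toNat ∧ c.toNat ≤ 57 := by
  rcases mem_tdc _ _ _ _ h with h | h
  · simp at h
  · exact h

theorem mem_toChars {n : Int} {c : Char} (h : c ∈ PySem.Int.toChars n) :
    c = '-' ∨ (48 ≤ c.toNat ∧ c.toNat ≤ 57) := by
  unfold PySem.Int.toChars at h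
  split at h
  · rcases List.mem_cons.mp h with h | h
    · exact Or.inl h
    · exact Or.inr (mem_toDigits h)
  · exact Or.inr (mem_toDigits h)

theorem toChars_ne_nil (n : Int) : PySem.Int.toChars n ≠ [] := by
  unfold PySem.Int.toChars
  split
  · simp
  · exact toDigits_ne_nil _

theorem comma_not_mem_toChars (n : Int) : ',' ∉ PySem.Int.toChars n := by
  intro h
  rcases mem_toChars h with h | h
  · exact absurd h (by decide)
  · revert h; decide

theorem toChars_inj : Function.Injective PySem.Int.toChars := by
  intro a b h
  unfold PySem.Int.toChars at h
  split_ifs at h with ha hb hb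
  · have := toDigits_inj (List.cons_injective h)
    omega
  · exfalso
    have : '-' ∈ Nat.toDigits 10 b.toNat := h ▸ List.mem_cons_self ..
    have := mem_toDigits this
    revert this; decide
  · exfalso
    have : '-' ∈ Nat.toDigits 10 a.toNat := h.symm ▸ List.mem_cons_self ..
    have := mem_toDigits this
    revert this; decide
  · have := toDigits_inj h
    omega

def keyL (c : List Int) : List Char := [','].intercalate (c.map PySem.Int.toChars)
def keyS (c : List Int) : String := PySem.Str.join "," (c.map PySem.Int.toStr)

theorem keyS_eq (c : List Int) : keyS c = String.ofList (keyL c) := by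
  unfold keyS keyL PySem.Str.join PySem.Chars.join
  rw [show (",".toList : List Char) = [','] by decide, List.map_map,
    show (String.toList ∘ PySem.Int.toStr) = PySem.Int.toChars from funext PySem.Int.toList_toStr]

theorem inter_singleton (x : List Char) : [','].intercalate [x] = x := by
  simp [List.intercalate]

theorem inter_cons_cons (x y : List Char) (t : List (List Char)) :
    [','].intercalate (x :: y :: t) = x ++ ',' :: [','].intercalate (y :: t) := by
  simp [List.intercalate, List.intersperse]

theorem keyL_ne_nil {c : List Int} (h : c ≠ []) : keyL c ≠ [] := by
  match c with
  | [a] => unfold keyL; simp only [List.map_cons, List.map_nil, inter_singleton]; exact toChars_ne_nil a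
  | a :: b :: t =>
    unfold keyL
    simp only [List.map_cons, inter_cons_cons]
    intro hx
    rcases List.append_eq_nil_iff.mp hx with ⟨h1, h2⟩
    exact toChars_ne_nil a h1

theorem keyS_empty_iff (c : List Int) : keyS c = "" ↔ c = [] := by
  constructor
  · intro h
    by_contra hne
    rw [keyS_eq] at h
    have : keyL c = [] :=
      String.ofList_inj.mp (h.trans (by decide : ("" : String) = String.ofList []))
    exact keyL_ne_nil hne this
  · rintro rfl; decide

theorem keyL_snoc {p : List Int} (x : Int) (h : p ≠ []) :
    keyL (p ++ [x]) = keyL p ++ ',' :: PySem.Int.toChars x := by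
  match p with
  | [a] => simp [keyL, inter_cons_cons, inter_singleton]
  | a :: b :: t =>
    have ih := keyL_snoc (p := b :: t) x (by simp)
    unfold keyL at *
    simp only [List.cons_append, List.map_cons, inter_cons_cons] at *
    rw [List.map_append] at ih
    simp only [List.map_cons, List.map_nil] at ih
    rw [show (List.map PySem.Int.toChars (t ++ [x])) = List.map PySem.Int.toChars t ++ [PySem.Int.toChars x] from by
      rw [List.map_append]; rfl]
    rw [ih]
    simp

theorem keyS_snoc (p : List Int) (x : Int) :
    keyS (p ++ [x]) = (if keyS p ≠ "" then keyS p ++ "," else keyS p) ++ PySem.Int.toStr x := by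
  by_cases hp : p = []
  · subst hp
    rw [if_neg (by simp [keyS_empty_iff])]
    rw [List.nil_append, keyS_eq]
    unfold keyL
    rw [List.map_cons, List.map_nil, inter_singleton]
    apply String.toList_inj.mp
    simp [PySem.Int.toList_toStr, keyS_empty_iff]
  · rw [if_pos (by simpa [keyS_empty_iff] using hp)]
    apply String.toList_inj.mp
    simp [keyS_eq, String.toList_append, keyL_snoc x hp, PySem.Int.toList_toStr]

theorem keyL_inj : Function.Injective keyL := by
  intro l1 l2 h
  unfold keyL at h
  match l1, l2 with
  | [], [] => rfl
  | [], a :: t => exact absurd h.symm (by simpa [keyL] using keyL_ne_nil (c := a :: t) (by simp))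
  | a :: t, [] => exact absurd h (by simpa [keyL] using keyL_ne_nil (c := a :: t) (by simp))
  | a :: t1, b :: t2 =>
    have h1 := List.splitOn_intercalate (ls := (a :: t1).map PySem.Int.toChars) ','
      (by rintro l hl; rcases List.mem_map.mp hl with ⟨y, _, rfl⟩; exact comma_not_mem_toChars y) (by simp)
    have h2 := List.splitOn_intercalate (ls := (b :: t2).map PySem.Int.toChars) ','
      (by rintro l hl; rcases List.mem_map.mp hl with ⟨y, _, rfl⟩; exact comma_not_mem_toChars y) (by simp)
    rw [h] at h1
    exact List.map_injective_iff.mpr toChars_inj (h1.symm.trans h2)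

theorem keyS_inj : Function.Injective keyS := by
  intro a b h
  rw [keyS_eq, keyS_eq] at h
  exact keyL_inj (String.ofList_inj.mp h)

def S (prob : List (Int × Int)) (c : List Int) : Int := c.foldl (fun a k => a + pyLook prob k) 0

theorem S_snoc (prob : List (Int × Int)) (p : List Int) (x : Int) :
    S prob (p ++ [x]) = S prob p + pyLook prob x := by
  unfold S
  rw [List.foldl_append]
  rfl

theorem nodup_combinations {α : Type} [DecidableEq α] : ∀ {xs : List α}, xs.Nodup → ∀ (r : Nat),
    (PySem.List.combinations xs r).Nodup := by
  intro xs
  induction xs with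
  | nil =>
    intro _ r
    cases r
    · rw [PySem.List.combinations_zero]; simp
    · rw [PySem.List.combinations_nil_succ]; simp
  | cons x xs ih =>
    intro h r
    have hx : x ∉ xs := (List.nodup_cons.mp h).1
    have hxs : xs.Nodup := (List.nodup_cons.mp h).2
    cases r with
    | zero => rw [PySem.List.combinations_zero]; simp
    | succ r =>
      rw [PySem.List.combinations_cons_succ]
      apply List.Nodup.append
      · exact (ih hxs r).map (fun a b hab => (List.cons_injective hab))
      · exact ih hxs (r+1)
      · intro c hc1 hc2
        rcases List.mem_map.mp hc1 with ⟨z, _, rfl⟩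
        have hsub := PySem.List.sublist_of_mem_combinations hc2
        exact hx (hsub.subset (List.mem_cons_self ..))

def CC (ks : List Int) (m : Nat) : List (List Int) :=
  (List.range m).flatMap (fun i => PySem.List.combinations ks (i + 1))

theorem CC_succ (ks : List Int) (m : Nat) :
    CC ks (m + 1) = CC ks m ++ PySem.List.combinations ks (m + 1) := by
  unfold CC
  rw [List.range_succ, List.flatMap_append]
  simp

theorem mem_CC {ks : List Int} {m : Nat} {c : List Int} (h : c ∈ CC ks m) :
    c.Sublist ks ∧ 1 ≤ c.length ∧ c.length ≤ m := by
  rcases List.mem_flatMap.mp h with ⟨i, hi, hc⟩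
  rcases (PySem.List.mem_combinations_iff ..).mp hc with ⟨hs, hl⟩
  have := List.mem_range.mp hi
  exact ⟨hs, by omega⟩

theorem mem_CC_of_mem_comb {ks : List Int} {i m : Nat} {c : List Int}
    (hi : i < m) (h : c ∈ PySem.List.combinations ks (i + 1)) : c ∈ CC ks m :=
  List.mem_flatMap.mpr ⟨i, List.mem_range.mpr hi, h⟩

theorem nodup_CC {ks : List Int} (h : ks.Nodup) : ∀ (m : Nat), (CC ks m).Nodup := by
  intro m
  induction m with
  | zero => unfold CC; simp
  | succ m ih =>
    rw [CC_succ]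
    apply List.Nodup.append ih (nodup_combinations h (m+1))
    intro c hc1 hc2
    have h1 := (mem_CC hc1).2.2
    have h2 := PySem.List.length_of_mem_combinations hc2
    omega



def entry (prob : List (Int × Int)) (c : List Int) : String × Int := (keyS c, S prob c)

theorem keys_of_items {d : PySem.Dict String Int} {l : List (String × Int)}
    (h : d.items = l) : d.keys = l.map Prod.fst := by
  simp only [PySem.Dict.keys, h]

theorem innerB (prob : List (Int × Int)) :
    ∀ (C P : List (List Int)) (res : PySem.Dict String Int),
    res.items = P.map (entry prob) →
    (P ++ C).Nodup →
    (C.foldl (fun res comb =>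
      res.insert (PySem.Str.join "," (comb.map PySem.Int.toStr))
                 (comb.foldl (fun a k => a + pyLook prob k) 0)) res).items
      = (P ++ C).map (entry prob) := by
  intro C
  induction C with
  | nil => intro P res h _; simpa using h
  | cons c C ih =>
    intro P res hitems hnd
    have hkeys : res.keys = P.map (fun c => keyS c) := by
      rw [keys_of_items hitems, List.map_map]; rfl
    have hcP : c ∉ P := by
      have := List.disjoint_of_nodup_append hnd
      exact fun hmem => this hmem (List.mem_cons_self ..)
    have hfresh : res.contains (keyS c) = false := by
      rw [PySem.Dict.contains_eq_decide_mem_keys, hkeys]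
      simp only [decide_eq_false_iff_not, List.mem_map, not_exists]
      rintro p ⟨hp, hkey⟩
      exact hcP (keyS_inj hkey ▸ hp)
    rw [List.foldl_cons]
    have hstep : (res.insert (PySem.Str.join "," (c.map PySem.Int.toStr))
        (c.foldl (fun a k => a + pyLook prob k) 0)).items = (P ++ [c]).map (entry prob) := by
      show (res.insert (keyS c) (S prob c)).items = _
      rw [PySem.Dict.items_insert_of_not_contains res _ hfresh, hitems]
      simp [entry]
    have hnd' : ((P ++ [c]) ++ C).Nodup := by
      rw [List.append_assoc, List.singleton_append]; exact hnd
    have := ih (P ++ [c]) _ hstep hnd'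
    rw [List.append_assoc, List.singleton_append] at this
    exact this

theorem innerA (prob : List (Int × Int)) :
    ∀ (C P : List (List Int)) (mem : PySem.Dict String Int),
    (∀ c ∈ P, c ≠ []) → (∀ c ∈ C, c ≠ []) →
    mem.items = ("", 0) :: P.map (entry prob) →
    (∀ c ∈ C, c.dropLast = [] ∨ c.dropLast ∈ P) →
    (P ++ C).Nodup →
    (C.foldl (fun mem comb =>
      let prev_str := PySem.Str.join "," ((PySem.List.slice comb none (some (-1))).map PySem.Int.toStr)
      let s := (mem.get? prev_str).getD 0 + pyLook prob ((PySem.List.pyGet? comb (-1)).getD 0)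
      let prev_str := if prev_str ≠ "" then prev_str ++ "," else prev_str
      let comb_str := prev_str ++ PySem.Int.toStr ((PySem.List.pyGet? comb (-1)).getD 0)
      mem.insert comb_str s) mem).items = ("", 0) :: (P ++ C).map (entry prob) := by
  intro C
  induction C with
  | nil => intro P mem _ _ h _ _; simpa using h
  | cons c C ih =>
    intro P mem hP hC hitems hdrop hnd
    have hc : c ≠ [] := hC c (List.mem_cons_self ..)
    have hkeys : mem.keys = "" :: P.map (fun c => keyS c) := by
      rw [keys_of_items hitems]; simp [entry]
    have hkeysnd : mem.keys.Nodup := by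
      rw [hkeys]
      refine List.nodup_cons.mpr ⟨?_, ?_⟩
      · intro hmem
        rcases List.mem_map.mp hmem with ⟨p, hp, hkey⟩
        exact hP p hp ((keyS_empty_iff p).mp hkey)
      · exact ((hnd.sublist (List.sublist_append_left ..)).map (fun a b h => keyS_inj h))
    have hcP : c ∉ P := fun hmem => (List.disjoint_of_nodup_append hnd) hmem (List.mem_cons_self ..)
    have hfresh : mem.contains (keyS c) = false := by
      rw [PySem.Dict.contains_eq_decide_mem_keys, hkeys]
      simp only [decide_eq_false_iff_not, List.mem_cons, List.mem_map, not_or, not_exists]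
      refine ⟨fun h => hc ((keyS_empty_iff c).mp h), ?_⟩
      rintro p ⟨hp, hkey⟩
      exact hcP (keyS_inj hkey ▸ hp)
    have hget : mem.get? (keyS c.dropLast) = some (S prob c.dropLast) := by
      rcases hdrop c (List.mem_cons_self ..) with h | h
      · rw [h, show keyS [] = "" by decide]
        exact PySem.Dict.get?_of_mem_items mem (by rw [hitems]; exact List.mem_cons_self ..) hkeysnd
      · exact PySem.Dict.get?_of_mem_items mem
          (by rw [hitems]; exact List.mem_cons_of_mem _ (List.mem_map_of_mem h)) hkeysnd
    have hstep : (let prev_str := PySem.Str.join "," ((PySem.List.slice c none (some (-1))).map PySem.Int.toStr)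
      let s := (mem.get? prev_str).getD 0 + pyLook prob ((PySem.List.pyGet? c (-1)).getD 0)
      let prev_str := if prev_str ≠ "" then prev_str ++ "," else prev_str
      let comb_str := prev_str ++ PySem.Int.toStr ((PySem.List.pyGet? c (-1)).getD 0)
      mem.insert comb_str s) = mem.insert (keyS c) (S prob c) := by
      obtain ⟨p, x, rfl⟩ : ∃ p x, c = p ++ [x] :=
        ⟨c.dropLast, c.getLast hc, (List.dropLast_append_getLast hc).symm⟩
      rw [List.dropLast_concat] at hget
      simp only [PySem.List.slice_to_neg_one, PySem.List.pyGet?_neg_one, List.dropLast_concat,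
        List.getLast?_concat, Option.getD_some]
      show mem.insert ((if keyS p ≠ "" then keyS p ++ "," else keyS p) ++ PySem.Int.toStr x)
        ((mem.get? (keyS p)).getD 0 + pyLook prob x) = mem.insert (keyS (p ++ [x])) (S prob (p ++ [x]))
      rw [hget, Option.getD_some, ← S_snoc]
      congr 1
      exact (keyS_snoc p x).symm
    rw [List.foldl_cons, hstep]
    have hitems' : (mem.insert (keyS c) (S prob c)).items = ("", 0) :: (P ++ [c]).map (entry prob) := by
      rw [PySem.Dict.items_insert_of_not_contains mem _ hfresh, hitems]
      simp [entry]
    have hnd' : ((P ++ [c]) ++ C).Nodup := by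
      rw [List.append_assoc, List.singleton_append]; exact hnd
    have := ih (P ++ [c]) _ (by
        intro a ha
        rcases List.mem_append.mp ha with h | h
        · exact hP a h
        · rw [List.mem_singleton.mp h]; exact hc)
      (fun a ha => hC a (List.mem_cons_of_mem _ ha)) hitems'
      (by
        intro a ha
        rcases hdrop a (List.mem_cons_of_mem _ ha) with h | h
        · exact Or.inl h
        · exact Or.inr (List.mem_append.mpr (Or.inl h)))
      hnd'
    rw [List.append_assoc, List.singleton_append] at this
    exact this

theorem outerA (prob : List (Int × Int)) (hnd : (prob.map Prod.fst).Nodup) : ∀ (j : Nat),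
    (((List.range j).foldl (fun mem i =>
      (PySem.List.combinations (prob.map Prod.fst) (i + 1)).foldl (fun mem comb =>
        let prev_str := PySem.Str.join "," ((PySem.List.slice comb none (some (-1))).map PySem.Int.toStr)
        let s := (mem.get? prev_str).getD 0 + pyLook prob ((PySem.List.pyGet? comb (-1)).getD 0)
        let prev_str := if prev_str ≠ "" then prev_str ++ "," else prev_str
        let comb_str := prev_str ++ PySem.Int.toStr ((PySem.List.pyGet? comb (-1)).getD 0)
        mem.insert comb_str s) mem) (PySem.Dict.mk [("", 0)])).items)
      = ("", 0) :: (CC (prob.map Prod.fst) j).map (entry prob) := by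
  intro j
  induction j with
  | zero => rfl
  | succ j ih =>
    rw [List.range_succ, List.foldl_append, List.foldl_cons, List.foldl_nil, CC_succ]
    apply innerA prob _ (CC (prob.map Prod.fst) j) _
      (fun c hc => List.ne_nil_of_length_pos (by have := (mem_CC hc).2.1; omega))
      (fun c hc => List.ne_nil_of_length_pos (by
        have := PySem.List.length_of_mem_combinations hc; omega))
      ih
      ?_ (by rw [← CC_succ]; exact nodup_CC hnd (j+1))
    intro c hc
    have hlen := PySem.List.length_of_mem_combinations hc
    have hsub := PySem.List.sublist_of_mem_combinations hc
    cases j with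
    | zero =>
      left
      have : c.dropLast.length = 0 := by rw [List.length_dropLast]; omega
      exact List.eq_nil_of_length_eq_zero this
    | succ j =>
      right
      apply mem_CC_of_mem_comb (i := j) (by omega)
      apply (PySem.List.mem_combinations_iff ..).mpr
      refine ⟨(List.dropLast_sublist c).trans hsub, ?_⟩
      rw [List.length_dropLast]; omega

theorem outerB (prob : List (Int × Int)) (hnd : (prob.map Prod.fst).Nodup) : ∀ (j : Nat),
    (((List.range j).foldl (fun res i =>
      (PySem.List.combinations (prob.map Prod.fst) (i + 1)).foldl (fun res comb =>
        res.insert (PySem.Str.join "," (comb.map PySem.Int.toStr))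
                   (comb.foldl (fun a k => a + pyLook prob k) 0)) res)
      (PySem.Dict.empty : PySem.Dict String Int)).items)
      = (CC (prob.map Prod.fst) j).map (entry prob) := by
  intro j
  induction j with
  | zero => rfl
  | succ j ih =>
    rw [List.range_succ, List.foldl_append, List.foldl_cons, List.foldl_nil, CC_succ]
    exact innerB prob _ (CC (prob.map Prod.fst) j) _ ih
      (by rw [← CC_succ]; exact nodup_CC hnd (j+1))

theorem toNat_one_add (i : Nat) : ((1 : Int) + (i : Int)).toNat = i + 1 := by omega

theorem erase_items (mem : PySem.Dict String Int) (prob : List (Int × Int))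
    (L : List (List Int)) (hL : ∀ c ∈ L, c ≠ [])
    (h : mem.items = ("", 0) :: L.map (entry prob)) :
    (mem.erase "").items = L.map (entry prob) := by
  unfold PySem.Dict.erase
  rw [h]
  rw [List.filter_cons_of_neg (by simp)]
  apply List.filter_eq_self.mpr
  intro p hp
  rcases List.mem_map.mp hp with ⟨c, hc, rfl⟩
  simp only [entry, Bool.not_eq_eq_eq_not, Bool.not_true, beq_eq_false_iff_ne, ne_eq]
  exact fun hk => hL c hc ((keyS_empty_iff c).mp hk)

-- ===== VERDICT (by name: the statement is the Claim_ definition above) =====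
theorem gen_prob_mem_spec : Claim_equal_gen_prob_mem := by
  intro prob _ hnd
  unfold Spec_gen_prob_mem gen_prob_mem gen_prob_mem_alt
  simp only [PySem.List.pyRange_one, PySem.List.len_eq, List.length_map, add_sub_cancel_right,
    Int.toNat_natCast, List.foldl_map, toNat_one_add]
  exact (erase_items _ prob _
    (fun c hc => List.ne_nil_of_length_pos (by have := (mem_CC hc).2.1; omega))
    (outerA prob hnd prob.length)).trans (outerB prob hnd prob.length).symm
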